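-- pv_equiv track=rewrite | github.com/Absolf/FPRO | re09/budgeting.py | lowerPrice
-- ===== SOURCE A (Python) =====
-- def lowerPrice(products, wishlist):
--     cheaper = 99999999999999999999999
--     product = None
--     for item in products:
--         if products[item] < cheaper and item in wishlist:
--             cheaper = products[item]
--             product = item
--     return product
-- ===== SOURCE B (Python) =====
-- def lowerPrice(products, wishlist):
--     wanted = set(wishlist)
--     candidates = [it for it in products.items() if it[0] in wanted]
--     candidates = sorted(candidates, key=lambda it: it[1])
--     return candidates[0][0] if candidates else None
-- ===== Notes on version B (the rewrite author's own statement) =====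
-- stated objective: simpler
-- what changed: Replaced the sentinel-initialised running-minimum loop by: hash the wishlist into a set, filter the products to wishlist candidates, stable-sort them by price and take the head (stability reproduces A's strict-< tie-breaking), with an explicit empty guard returning None.
import Mathlib
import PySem

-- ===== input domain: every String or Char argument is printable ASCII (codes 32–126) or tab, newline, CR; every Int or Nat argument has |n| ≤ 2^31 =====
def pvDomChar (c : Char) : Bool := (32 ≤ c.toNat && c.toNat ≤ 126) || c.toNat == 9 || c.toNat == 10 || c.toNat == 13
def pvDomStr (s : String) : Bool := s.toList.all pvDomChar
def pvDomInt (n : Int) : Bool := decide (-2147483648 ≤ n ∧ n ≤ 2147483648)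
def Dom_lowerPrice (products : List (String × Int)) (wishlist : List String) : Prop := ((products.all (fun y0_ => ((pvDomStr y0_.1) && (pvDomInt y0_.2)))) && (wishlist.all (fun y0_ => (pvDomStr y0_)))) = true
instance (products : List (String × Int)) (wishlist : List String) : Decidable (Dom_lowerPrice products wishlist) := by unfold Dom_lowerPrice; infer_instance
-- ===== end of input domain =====

-- B replaces A's sentinel-initialised running-minimum loop by filter + stable sort by
-- price + head (objective: simpler). Equivalence proved on products with distinct keys.

-- ===== PORT A =====
-- 'for item in products: if products[item] < cheaper and item in wishlist: …'
-- (keys are distinct under Pre_, so the pair's own value is products[item])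
def lpStepA (wishlist : List String) (acc : Int × Option String) (it : String × Int) :
    Int × Option String :=
  if decide (it.2 < acc.1) && wishlist.contains it.1 then (it.2, some it.1) else acc

def lowerPrice (products : List (String × Int)) (wishlist : List String) : Option String :=
  (products.foldl (lpStepA wishlist) ((99999999999999999999999 : Int), (none : Option String))).2

-- ===== PORT B =====
def lowerPrice_alt (products : List (String × Int)) (wishlist : List String) : Option String :=
  let wanted : PySem.Set String := PySem.Set.ofList wishlist
  let candidates := products.filter (fun it => PySem.Set.contains wanted it.1)
  match PySem.List.sorted candidates (fun it => it.2) false with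
  | [] => none
  | q :: _ => some q.1

-- ===== PRECONDITION & SPEC =====
-- Pre_ excludes duplicate product keys: a Python dict cannot hold them, so on such
-- association lists the model (first-match lookup) diverges from the dict A receives
-- (last value wins); both Python programs see the same collapsed dict there anyway.
def Pre_lowerPrice (products : List (String × Int)) (wishlist : List String) : Prop :=
  (products.map Prod.fst).Nodup

instance (products : List (String × Int)) (wishlist : List String) :
    Decidable (Pre_lowerPrice products wishlist) := by unfold Pre_lowerPrice; infer_instance

def pvWitness_lowerPrice : (List (String × Int)) × List String :=
  ([("a", 3), ("b", 2), ("c", 2)], ["b", "c"])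

def Spec_lowerPrice (products : List (String × Int)) (wishlist : List String) (out : Option String) : Prop := out = lowerPrice_alt products wishlist
instance (products : List (String × Int)) (wishlist : List String) (out : Option String) : Decidable (Spec_lowerPrice products wishlist out) := by unfold Spec_lowerPrice; infer_instance

-- ===== CLAIM (what is proved, stated in full; the proofs are below) =====
def Claim_equal_lowerPrice : Prop := ∀ (products : List (String × Int)) (wishlist : List String), Dom_lowerPrice products wishlist → Pre_lowerPrice products wishlist → Spec_lowerPrice products wishlist (lowerPrice products wishlist)

-- ===== LEMMAS AND PROOFS =====

-- "keep the earlier element unless the new one is strictly cheaper": the head step of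
-- both A's loop and the stable insertion sort.
def lpPick (o : Option (String × Int)) (x : String × Int) : Option (String × Int) :=
  match o with
  | none => some x
  | some a => if x.2 < a.2 then some x else some a

theorem insertBy_head (x : String × Int) (ys : List (String × Int)) :
    (PySem.List.insertBy (fun a b => decide (a.2 < b.2)) x ys).head? = lpPick ys.head? x := by
  cases ys with
  | nil => rfl
  | cons y t =>
    simp only [PySem.List.insertBy, lpPick]
    by_cases h : x.2 < y.2 <;> simp [h, List.head?]

theorem foldl_insertBy_head (cs acc : List (String × Int)) :
    (cs.foldl (fun acc x => PySem.List.insertBy (fun a b => decide (a.2 < b.2)) x acc) acc).head?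
      = cs.foldl lpPick acc.head? := by
  induction cs generalizing acc with
  | nil => rfl
  | cons c t ih => simp only [List.foldl_cons, ih, insertBy_head]

theorem sorted_head (cs : List (String × Int)) :
    (PySem.List.sorted cs (fun it => it.2) false).head? = cs.foldl lpPick none := by
  rw [PySem.List.sorted_eq_foldl_insertBy]
  exact foldl_insertBy_head cs []

def lpPack (o : Option (String × Int)) : Int × Option String :=
  match o with
  | none => ((99999999999999999999999 : Int), none)
  | some q => (q.2, some q.1)

theorem foldA_some (wishlist : List String) (cs : List (String × Int)) (q : String × Int) :
    cs.foldl (lpStepA wishlist) (q.2, some q.1)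
      = lpPack ((cs.filter (fun it => wishlist.contains it.1)).foldl lpPick (some q)) := by
  induction cs generalizing q with
  | nil => rfl
  | cons c t ih =>
    simp only [List.foldl_cons, List.filter_cons, lpStepA]
    by_cases hf : wishlist.contains c.1
    · by_cases hlt : c.2 < q.2
      · rw [if_pos (by simp [hlt]; simpa using hf), if_pos hf]
        simp only [List.foldl_cons, lpPick]
        rw [if_pos hlt]
        exact ih c
      · rw [if_neg (by simp [hlt]), if_pos hf]
        simp only [List.foldl_cons, lpPick]
        rw [if_neg hlt]
        exact ih q
    · rw [if_neg (by simp; intro _; simpa using hf), if_neg hf]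
      exact ih q

theorem foldA_none (wishlist : List String) (cs : List (String × Int))
    (hb : ∀ x ∈ cs, x.2 < 99999999999999999999999) :
    cs.foldl (lpStepA wishlist) ((99999999999999999999999 : Int), none)
      = lpPack ((cs.filter (fun it => wishlist.contains it.1)).foldl lpPick none) := by
  induction cs with
  | nil => rfl
  | cons c t ih =>
    have hc : c.2 < 99999999999999999999999 := hb c (List.mem_cons_self ..)
    simp only [List.foldl_cons, List.filter_cons, lpStepA]
    by_cases hf : wishlist.contains c.1
    · rw [if_pos (by simp [hc]; simpa using hf), if_pos hf]
      simp only [List.foldl_cons, lpPick]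
      exact foldA_some wishlist t c
    · rw [if_neg (by simp; intro _; simpa using hf), if_neg hf]
      exact ih (fun x hx => hb x (List.mem_cons_of_mem _ hx))

-- ===== VERDICT (by name: the statement is the Claim_ definition above) =====
theorem lowerPrice_spec : Claim_equal_lowerPrice := by
  intro products wishlist hdom _hpre
  unfold Spec_lowerPrice lowerPrice
  have hb : ∀ x ∈ products, x.2 < 99999999999999999999999 := by
    intro x hx
    have := (List.all_eq_true.mp (Bool.and_elim_left hdom)) x hx
    simp only [Bool.and_eq_true, pvDomInt, decide_eq_true_eq] at this
    omega
  rw [foldA_none wishlist products hb]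
  have hfe : products.filter (fun it => PySem.Set.contains (PySem.Set.ofList wishlist) it.1)
      = products.filter (fun it => wishlist.contains it.1) :=
    List.filter_congr (fun x _ => by simp [PySem.Set.contains, PySem.Set.mem_ofList])
  show (lpPack ((products.filter (fun it => wishlist.contains it.1)).foldl lpPick none)).2
      = match PySem.List.sorted
          (products.filter (fun it => PySem.Set.contains (PySem.Set.ofList wishlist) it.1))
          (fun it => it.2) false with
        | [] => none
        | q :: _ => some q.1
  rw [hfe]
  have h := sorted_head (products.filter (fun it => wishlist.contains it.1))
  cases hs : PySem.List.sorted (products.filter (fun it => wishlist.contains it.1))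
      (fun it => it.2) false with
  | nil =>
    rw [hs] at h; simp only [List.head?_nil] at h
    rw [← h]; rfl
  | cons q t =>
    rw [hs] at h; simp only [List.head?_cons] at h
    rw [← h]; rfl
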